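-- pv_equiv track=rewrite | github.com/amusci/escapingTutorialHell | python/sumOfNeg.py | sum_neg
-- ===== SOURCE A (Python) =====
-- def sum_neg(lst):
--
--     count = 0
--     sum_of_neg = 0
--     ans = []
--
--     if not lst:
--         return []
--
--     else:
--
--         for i in lst:
--             if i >= 0:
--                 count += 1
--             else:
--                 sum_of_neg += i
--
--     return [count, sum_of_neg]
-- ===== SOURCE B (Python) =====
-- def sum_neg(lst):
--     if not lst:
--         return []
--     negs = [i for i in lst if i < 0]
--     return [len(lst) - len(negs), sum(negs)]
-- ===== Notes on version B (the rewrite author's own statement) =====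
-- stated objective: simpler
-- what changed: Replaces the single manual loop with two running accumulators by materializing the sublist of negatives via a comprehension, summing it, and deriving the non-negative count as len(lst) - len(negs).
import Mathlib
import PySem

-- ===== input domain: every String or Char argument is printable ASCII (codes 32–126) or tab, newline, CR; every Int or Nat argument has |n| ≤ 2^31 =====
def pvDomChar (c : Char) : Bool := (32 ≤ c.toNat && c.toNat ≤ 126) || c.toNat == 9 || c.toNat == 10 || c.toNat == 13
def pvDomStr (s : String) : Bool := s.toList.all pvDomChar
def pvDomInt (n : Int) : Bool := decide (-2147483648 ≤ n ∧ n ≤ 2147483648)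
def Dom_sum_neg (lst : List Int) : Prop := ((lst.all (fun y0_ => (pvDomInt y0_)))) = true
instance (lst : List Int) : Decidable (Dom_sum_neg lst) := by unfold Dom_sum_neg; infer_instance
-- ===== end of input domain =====

-- B derives the non-negative count as length minus the number of negatives from a
-- filtered sublist, instead of A's single loop with two accumulators (objective: simpler).


-- ===== PORT A =====
-- loop over lst updating (count, sum_of_neg)
def sum_neg_loop (l : List Int) (count : Int) (sum_of_neg : Int) : Int × Int :=
  match l with
  | [] => (count, sum_of_neg)
  | i :: rest =>
    if i ≥ 0 then sum_neg_loop rest (count + 1) sum_of_neg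
    else sum_neg_loop rest count (sum_of_neg + i)

def sum_neg (lst : List Int) : List Int :=
  if lst = [] then []
  else
    let r := sum_neg_loop lst 0 0
    [r.1, r.2]

-- ===== PORT B =====
def sum_neg_alt (lst : List Int) : List Int :=
  if lst = [] then []
  else
    let negs := lst.filter (fun i => i < 0)
    [(lst.length : Int) - (negs.length : Int), negs.sum]

-- ===== PRECONDITION & SPEC =====
def Spec_sum_neg (lst : List Int) (out : List Int) : Prop := out = sum_neg_alt lst
instance (lst : List Int) (out : List Int) : Decidable (Spec_sum_neg lst out) := by unfold Spec_sum_neg; infer_instance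

-- ===== CLAIM (what is proved, stated in full; the proofs are below) =====
def Claim_equal_sum_neg : Prop := ∀ (lst : List Int), Dom_sum_neg lst → Spec_sum_neg lst (sum_neg lst)

-- ===== LEMMAS AND PROOFS =====
theorem sum_neg_loop_spec (l : List Int) (c s : Int) :
    sum_neg_loop l c s =
      (c + ((l.length : Int) - ((l.filter (fun i => i < 0)).length : Int)),
       s + (l.filter (fun i => i < 0)).sum) := by
  induction l generalizing c s with
  | nil => simp [sum_neg_loop]
  | cons i rest ih =>
    by_cases h : i ≥ 0
    · have hn : ¬ (i < 0) := by omega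
      simp [sum_neg_loop, h, hn, ih]
      ring
    · have hn : i < 0 := by omega
      simp [sum_neg_loop, h, hn, ih]
      ring

-- ===== VERDICT (by name: the statement is the Claim_ definition above) =====
theorem sum_neg_spec : Claim_equal_sum_neg := by
  intro lst _
  unfold Spec_sum_neg sum_neg sum_neg_alt
  by_cases h : lst = []
  · simp [h]
  · simp [h, sum_neg_loop_spec]
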